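-- pv_equiv track=rewrite | github.com/AnshG714/CodingPractice | Strings/prefixStrings.py | prefixStringsHelper
-- ===== SOURCE A (Python) =====
-- def prefixStringsHelper(s, a):
--     p = 0
--     l = len(s)
--
--     for pre in a:
--         if p == len(s):
--             return True
--
--         pre_l = len(pre)
--         if pre != s[p:p + pre_l]:
--             return False
--
--         p += pre_l
--
--     return p == l
-- ===== SOURCE B (Python) =====
-- def prefixStringsHelper(s, a):
--     joined = ''.join(a)
--     boundaries = {0}
--     total = 0
--     for pre in a:
--         total += len(pre)
--         boundaries.add(total)
--     return len(s) in boundaries and joined[:len(s)] == s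
-- ===== Notes on version B (the rewrite author's own statement) =====
-- stated objective: alternative
-- what changed: Instead of matching prefixes incrementally against slices of s with an early return, B joins the list once, records the set of cumulative length boundaries in one pass, and answers by a set-membership test plus a single prefix comparison joined[:len(s)] == s.
import Mathlib
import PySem

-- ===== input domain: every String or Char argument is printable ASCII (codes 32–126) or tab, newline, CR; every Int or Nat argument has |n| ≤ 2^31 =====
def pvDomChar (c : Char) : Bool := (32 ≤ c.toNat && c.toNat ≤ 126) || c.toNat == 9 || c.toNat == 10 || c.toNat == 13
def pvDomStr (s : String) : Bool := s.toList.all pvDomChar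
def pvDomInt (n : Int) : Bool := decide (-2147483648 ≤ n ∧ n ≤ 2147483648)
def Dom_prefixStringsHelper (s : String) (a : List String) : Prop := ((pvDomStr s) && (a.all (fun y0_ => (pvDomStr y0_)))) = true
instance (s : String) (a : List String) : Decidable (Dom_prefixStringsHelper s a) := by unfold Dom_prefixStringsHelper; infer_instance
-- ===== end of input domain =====

-- B replaces A's incremental slice-matching loop with a one-pass boundary set plus one
-- prefix comparison of the joined string (objective: alternative decomposition, same cost).

-- ===== PORT A =====
-- A's for-loop over `a` with running offset p; `p == len(s)` early return, slice compare, else advance.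
def pshLoop (sl : List Char) (l : Int) : List String → Int → Bool
  | [], p => p == l
  | pre :: rest, p =>
    if p == l then true
    else
      let preL : Int := PySem.Str.len pre
      if !(pre.toList == PySem.Chars.slice sl (some p) (some (p + preL))) then false
      else pshLoop sl l rest (p + preL)

def prefixStringsHelper (s : String) (a : List String) : Bool :=
  pshLoop s.toList (PySem.Str.len s) a 0

-- ===== PORT B =====
def prefixStringsHelper_alt (s : String) (a : List String) : Bool :=
  let joined := PySem.Str.join "" a
  let st := a.foldl
    (fun (st : PySem.Set Int × Int) pre =>
      let total := st.2 + PySem.Str.len pre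
      (PySem.Set.add st.1 total, total))
    (PySem.Set.ofList [(0 : Int)], (0 : Int))
  decide ((PySem.Str.len s) ∈ st.1) &&
    (PySem.Chars.slice joined.toList none (some (PySem.Str.len s)) == s.toList)

-- ===== PRECONDITION & SPEC =====
def Spec_prefixStringsHelper (s : String) (a : List String) (out : Bool) : Prop := out = prefixStringsHelper_alt s a
instance (s : String) (a : List String) (out : Bool) : Decidable (Spec_prefixStringsHelper s a out) := by unfold Spec_prefixStringsHelper; infer_instance

-- ===== CLAIM (what is proved, stated in full; the proofs are below) =====
def Claim_equal_prefixStringsHelper : Prop := ∀ (s : String) (a : List String), Dom_prefixStringsHelper s a → Spec_prefixStringsHelper s a (prefixStringsHelper s a)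

-- ===== LEMMAS AND PROOFS =====

-- spec-level loop: A's loop rephrased on the remaining suffix t of s
def loopT : List String → List Char → Bool
  | [], t => t.isEmpty
  | pre :: rest, t =>
    if t.isEmpty then true
    else if pre.toList.isPrefixOf t then loopT rest (t.drop pre.toList.length) else false

-- cumulative boundary list starting from base b (excluding b itself)
def bndsFrom (b : Int) : List String → List Int
  | [] => []
  | pre :: rest => (b + PySem.Str.len pre) :: bndsFrom (b + PySem.Str.len pre) rest

lemma mem_bndsFrom_shift (x : Int) : ∀ (a : List String) (b d : Int),
    x ∈ bndsFrom (b + d) a ↔ x - d ∈ bndsFrom b a := by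
  intro a
  induction a with
  | nil => intro b d; simp [bndsFrom]
  | cons pre rest ih =>
    intro b d
    simp only [bndsFrom, List.mem_cons]
    have : b + d + PySem.Str.len pre = (b + PySem.Str.len pre) + d := by ring
    rw [this, ih (b + PySem.Str.len pre) d]
    constructor
    · rintro (h | h) <;> [left; right] <;> first | omega | exact h
    · rintro (h | h) <;> [left; right] <;> first | omega | exact h

lemma le_of_mem_bndsFrom (x : Int) : ∀ (a : List String) (b : Int), x ∈ bndsFrom b a → b ≤ x := by
  intro a
  induction a with
  | nil => intro b h; simp [bndsFrom] at h
  | cons pre rest ih =>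
    intro b h
    simp only [bndsFrom, List.mem_cons] at h
    have hlen : (0 : Int) ≤ PySem.Str.len pre := by
      simp [PySem.Str.len, PySem.Chars.len]
    rcases h with h | h
    · omega
    · have := ih (b + PySem.Str.len pre) h; omega

lemma strLen_eq (s : String) : PySem.Str.len s = (s.toList.length : Int) := by
  simp [PySem.Str.len]

lemma loopT_eq : ∀ (a : List String) (t : List Char),
    loopT a t = (decide ((t.length : Int) ∈ (0 : Int) :: bndsFrom 0 a)
      && t.isPrefixOf ((a.map String.toList).flatten)) := by
  intro a
  induction a with
  | nil =>
    intro t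
    cases t <;> simp [loopT, bndsFrom]
  | cons pre rest ih =>
    intro t
    by_cases ht : t = []
    · subst ht; simp [loopT]
    · have htE : t.isEmpty = false := by simp [List.isEmpty_iff, ht]
      have hlen0 : t.length ≠ 0 := by simp [ht]
      have hshift := mem_bndsFrom_shift ((t.length : Nat) : Int) rest 0 (PySem.Str.len pre)
      rw [zero_add] at hshift
      by_cases hpre : pre.toList <+: t
      · -- matching step
        have hle : pre.toList.length ≤ t.length := hpre.length_le
        rw [show loopT (pre :: rest) t = loopT rest (t.drop pre.toList.length) by
          simp [loopT, htE, hpre]]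
        rw [ih]
        have hTL : pre.toList.length = pre.length := String.length_toList
        congr 1
        · -- boundary membership part
          have hx : ((t.drop pre.toList.length).length : Int)
              = (t.length : Int) - PySem.Str.len pre := by
            rw [strLen_eq]; simp; omega
          simp only [List.mem_cons, bndsFrom, zero_add, decide_eq_decide]
          rw [hx]
          rw [strLen_eq] at hshift ⊢
          constructor
          · rintro (h | h)
            · right; left; omega
            · right; right; exact hshift.mpr h
          · rintro (h | h | h)
            · exfalso; exact hlen0 (by exact_mod_cast h)
            · left; omega
            · right; exact hshift.mp h
        · -- prefix part
          obtain ⟨t', rfl⟩ := hpre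
          rw [List.drop_left, Bool.eq_iff_iff]
          simp [List.isPrefixOf_iff_prefix, List.prefix_append_right_inj]
      · -- mismatch: both sides false
        rw [show loopT (pre :: rest) t = false by simp [loopT, htE, hpre]]
        symm
        simp only [Bool.and_eq_false_iff]
        by_cases hmem : (t.length : Int) ∈ (0 : Int) :: bndsFrom 0 (pre :: rest)
        · right
          -- every listed boundary but 0 is ≥ len pre, so len pre ≤ t.length; a prefix of
          -- pre ++ _ that long would make pre a prefix of t, contradicting the mismatch
          have hge : PySem.Str.len pre ≤ (t.length : Int) := by
            simp only [List.mem_cons, bndsFrom, zero_add] at hmem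
            rcases hmem with h | h | h
            · exact absurd (by exact_mod_cast h) hlen0
            · omega
            · exact le_of_mem_bndsFrom _ rest (PySem.Str.len pre) h
          have hge' : pre.toList.length ≤ t.length := by
            rw [strLen_eq] at hge; omega
          rw [Bool.eq_false_iff]
          intro hcontr
          rw [List.isPrefixOf_iff_prefix] at hcontr
          simp only [List.map_cons, List.flatten_cons] at hcontr
          exact hpre (List.prefix_of_prefix_length_le (List.prefix_append _ _) hcontr hge')
        · left; simp [hmem]

-- A's loop from offset p equals the spec loop on the suffix
lemma pshLoop_eq (sl : List Char) : ∀ (a : List String) (p : Nat), p ≤ sl.length →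
    pshLoop sl (sl.length : Int) a (p : Int) = loopT a (sl.drop p) := by
  intro a
  induction a with
  | nil =>
    intro p hp
    show ((p : Int) == (sl.length : Int)) = (List.drop p sl).isEmpty
    rw [Bool.eq_iff_iff]
    simp [List.isEmpty_iff, List.drop_eq_nil_iff]
    omega
  | cons pre rest ih =>
    intro p hp
    by_cases hpl : p = sl.length
    · subst hpl
      simp [pshLoop, loopT]
    · have hplI : ((p : Int) == (sl.length : Int)) = false := by
        simp; omega
      have hnE : (sl.drop p).isEmpty = false := by
        simp [List.isEmpty_iff, List.drop_eq_nil_iff]; omega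
      rw [show pshLoop sl (sl.length : Int) (pre :: rest) (p : Int)
            = if !(pre.toList == PySem.Chars.slice sl (some (p : Int))
                (some ((p : Int) + PySem.Str.len pre))) then false
              else pshLoop sl (sl.length : Int) rest ((p : Int) + PySem.Str.len pre) by
          conv_lhs => rw [pshLoop]
          rw [if_neg (by simp at hplI ⊢; omega)]]
      have hslice : PySem.Chars.slice sl (some (p : Int))
          (some ((p : Int) + PySem.Str.len pre)) = (sl.drop p).take pre.toList.length := by
        rw [strLen_eq, PySem.Chars.slice_eq_listSlice]
        exact_mod_cast PySem.List.slice_natCast_add sl p pre.toList.length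
      rw [hslice]
      by_cases hpre : pre.toList <+: sl.drop p
      · have heq : (pre.toList == (sl.drop p).take pre.toList.length) = true := by
          exact beq_iff_eq.mpr (List.prefix_iff_eq_take.mp hpre)
        have hle : pre.toList.length ≤ (sl.drop p).length := hpre.length_le
        rw [heq]
        have hstep : (p : Int) + PySem.Str.len pre = ((p + pre.toList.length : Nat) : Int) := by
          rw [strLen_eq]; push_cast; ring
        rw [hstep, ih (p + pre.toList.length) (by simp only [List.length_drop] at hle; omega)]
        rw [show loopT (pre :: rest) (sl.drop p)
              = loopT rest ((sl.drop p).drop pre.toList.length) by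
            simp [loopT, hnE, hpre]]
        rw [List.drop_drop]
        simp
      · have hne : (pre.toList == (sl.drop p).take pre.toList.length) = false := by
          simp only [beq_eq_false_iff_ne, ne_eq]
          intro hcontr
          exact hpre (List.prefix_iff_eq_take.mpr hcontr)
        rw [hne]
        simp [loopT, hnE, hpre]

-- the boundary-set fold of B, characterised
lemma mem_fold (x : Int) : ∀ (a : List String) (S : PySem.Set Int) (b : Int),
    (x ∈ (a.foldl
      (fun (st : PySem.Set Int × Int) pre =>
        let total := st.2 + PySem.Str.len pre
        (PySem.Set.add st.1 total, total)) (S, b)).1)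
    ↔ x ∈ S ∨ x ∈ bndsFrom b a := by
  intro a
  induction a with
  | nil => intro S b; simp [bndsFrom]
  | cons pre rest ih =>
    intro S b
    simp only [List.foldl_cons, bndsFrom, List.mem_cons]
    rw [ih]
    rw [PySem.Set.mem_add]
    tauto

lemma chars_join_nil : ∀ (ps : List (List Char)), PySem.Chars.join [] ps = ps.flatten := by
  intro ps
  induction ps with
  | nil => simp [PySem.Chars.join_nil]
  | cons p rest ih =>
    cases rest with
    | nil => simp [PySem.Chars.join_singleton]
    | cons q r =>
      rw [PySem.Chars.join_cons_cons]
      simp only [List.flatten_cons]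
      rw [ih]
      simp

-- ===== VERDICT (by name: the statement is the Claim_ definition above) =====
theorem prefixStringsHelper_spec : Claim_equal_prefixStringsHelper := by
  intro s a _
  unfold Spec_prefixStringsHelper prefixStringsHelper prefixStringsHelper_alt
  have hA : pshLoop s.toList ((s.toList.length : Nat) : Int) a (((0 : Nat)) : Int)
      = loopT a (s.toList.drop 0) := pshLoop_eq s.toList a 0 (Nat.zero_le _)
  simp only [List.drop_zero, Nat.cast_zero] at hA
  rw [strLen_eq s, hA, loopT_eq]
  simp only []
  congr 1
  · -- boundary membership
    rw [decide_eq_decide, mem_fold]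
    rw [show ((0 : Int) = ((0:Nat) : Int)) from rfl]
    simp only [PySem.Set.mem_ofList, List.mem_cons, List.mem_singleton, List.not_mem_nil,
      or_false]
  · -- prefix comparison
    have hj : (PySem.Str.join "" a).toList = (a.map String.toList).flatten := by
      rw [PySem.Str.toList_join]
      exact chars_join_nil (a.map String.toList)
    rw [hj, PySem.Chars.slice_eq_listSlice]
    rw [show PySem.List.slice ((a.map String.toList).flatten) none (some ((s.toList.length : Nat) : Int))
          = ((a.map String.toList).flatten).take s.toList.length from
        PySem.List.slice_to_natCast _ _]
    rw [Bool.eq_iff_iff]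
    simp only [List.isPrefixOf_iff_prefix, beq_iff_eq]
    rw [List.prefix_iff_eq_take]
    exact ⟨Eq.symm, Eq.symm⟩
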